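-- pv_equiv track=rewrite | github.com/DullPinard/DataMining | utils.py | merge_same_list
-- ===== SOURCE A (Python) =====
-- from collections import defaultdict
--
-- def merge_same_list(lists):
--     # 使用字典来记录每个集合对应的列表索引
--     set_to_indices = defaultdict(list)
--     for index, lst in enumerate(lists):
--         # 将列表转换为集合并排序以确保顺序一致
--         set_representation = tuple(sorted(set(lst)))
--         set_to_indices[set_representation].append(index)
--
--     # 根据等价关系合并列表
--     merged_lists = []
--     for indices in set_to_indices.values():
--         if len(indices) > 1:
--             # 如果有多个列表包含相同的元素，则合并它们
--             merged_list = lists[indices[0]]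
--             for i in indices[1:]:
--                 # 验证所有列表是否真的包含相同的元素
--                 if set(lists[i]) == set(merged_list):
--                     merged_list = merged_list  # 合并逻辑，这里因为元素相同所以直接使用第一个列表
--             merged_lists.append(merged_list)
--         else:
--             # 如果只有一个列表包含这些元素，则直接添加
--             merged_lists.append(lists[indices[0]])
--
--     return merged_lists
-- ===== SOURCE B (Python) =====
-- def merge_same_list(lists):
--     # One streaming pass: keep the first list for each distinct element-set.
--     seen = set()
--     result = []
--     for lst in lists:
--         key = tuple(sorted(set(lst)))
--         if key not in seen:
--             seen.add(key)
--             result.append(lst)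
--     return result
-- ===== Notes on version B (the rewrite author's own statement) =====
-- stated objective: simpler
-- what changed: Replaces the two-pass build-key->indices-dict-then-reconstruct structure (with its vacuous inner verification loop) by a single streaming filter that maintains a seen-set of canonical keys and appends each first-occurring list directly.
import Mathlib
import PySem

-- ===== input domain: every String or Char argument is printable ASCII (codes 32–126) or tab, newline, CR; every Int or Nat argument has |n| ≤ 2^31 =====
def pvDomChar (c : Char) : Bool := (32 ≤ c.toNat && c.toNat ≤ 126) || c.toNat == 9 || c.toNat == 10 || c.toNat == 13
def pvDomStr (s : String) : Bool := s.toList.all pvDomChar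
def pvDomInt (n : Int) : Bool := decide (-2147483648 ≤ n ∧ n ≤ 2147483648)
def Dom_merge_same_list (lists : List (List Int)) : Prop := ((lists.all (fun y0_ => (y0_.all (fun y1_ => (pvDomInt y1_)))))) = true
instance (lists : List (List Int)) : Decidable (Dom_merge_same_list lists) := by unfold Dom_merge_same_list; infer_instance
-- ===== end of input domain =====

-- B replaces A's two-pass dict-of-indices grouping by a single streaming seen-set filter (simpler, same result).


-- ===== PORT A =====
-- tuple(sorted(set(lst))) — the canonical key both Pythons compute
def msKey (l : List Int) : List Int := PySem.List.sorted (PySem.Set.ofList l) (fun x => x) false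

def merge_same_list (lists : List (List Int)) : List (List Int) :=
  -- set_to_indices = defaultdict(list); for index, lst in enumerate(lists): set_to_indices[key].append(index)
  let d := (PySem.List.enumerate lists 0).foldl
    (fun d p => d.modify (msKey p.2) [] (fun v => v ++ [p.1])) (PySem.Dict.empty)
  -- for indices in set_to_indices.values(): …   (indexing is always in range here, so pyGetD is exact)
  d.values.foldl
    (fun merged idxs =>
      if idxs.length > 1 then
        let m0 := PySem.List.pyGetD lists (PySem.List.pyGetD idxs 0 0) []
        let m := (PySem.List.slice idxs (some 1) none).foldl
          (fun m i => if PySem.Set.equal (PySem.Set.ofList (PySem.List.pyGetD lists i [])) (PySem.Set.ofList m) then m else m) m0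
        merged ++ [m]
      else
        merged ++ [PySem.List.pyGetD lists (PySem.List.pyGetD idxs 0 0) []]) []

-- ===== PORT B =====
def merge_same_list_alt (lists : List (List Int)) : List (List Int) :=
  (lists.foldl
    (fun st lst =>
      if PySem.Set.contains st.1 (msKey lst) then st
      else (PySem.Set.add st.1 (msKey lst), st.2 ++ [lst]))
    ((PySem.Set.empty : PySem.Set (List Int)), ([] : List (List Int)))).2

-- ===== PRECONDITION & SPEC =====
def Spec_merge_same_list (lists : List (List Int)) (out : List (List Int)) : Prop := out = merge_same_list_alt lists
instance (lists : List (List Int)) (out : List (List Int)) : Decidable (Spec_merge_same_list lists out) := by unfold Spec_merge_same_list; infer_instance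

-- ===== CLAIM (what is proved, stated in full; the proofs are below) =====
def Claim_equal_merge_same_list : Prop := ∀ (lists : List (List Int)), Dom_merge_same_list lists → Spec_merge_same_list lists (merge_same_list lists)

-- ===== LEMMAS AND PROOFS =====

-- the value A emits for a group: lists[indices[0]]
def msG (lists : List (List Int)) (idxs : List Int) : List Int :=
  PySem.List.pyGetD lists (PySem.List.pyGetD idxs 0 0) []

-- A's inner "verification" loop keeps merged_list unchanged
lemma msInner_id (lists : List (List Int)) (m : List Int) (is : List Int) :
    is.foldl (fun m i => if PySem.Set.equal (PySem.Set.ofList (PySem.List.pyGetD lists i []))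
        (PySem.Set.ofList m) then m else m) m = m := by
  have h : (fun (m : List Int) (i : Int) => if PySem.Set.equal (PySem.Set.ofList (PySem.List.pyGetD lists i []))
      (PySem.Set.ofList m) then m else m) = (fun m _ => m) := by
    funext m i; exact ite_self m
  rw [h]; exact PySem.List.foldl_ignore is m

-- A's second pass is just: map msG over the dict's value lists
lemma msA_eq_map (lists : List (List Int)) :
    merge_same_list lists =
      (((PySem.List.enumerate lists 0).foldl
        (fun d p => d.modify (msKey p.2) [] (fun v => v ++ [p.1])) PySem.Dict.empty).values).map (msG lists) := by
  unfold merge_same_list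
  rw [show (fun (merged : List (List Int)) (idxs : List Int) =>
      if idxs.length > 1 then
        merged ++ [(PySem.List.slice idxs (some 1) none).foldl
          (fun m i => if PySem.Set.equal (PySem.Set.ofList (PySem.List.pyGetD lists i [])) (PySem.Set.ofList m) then m else m)
          (PySem.List.pyGetD lists (PySem.List.pyGetD idxs 0 0) [])]
      else merged ++ [PySem.List.pyGetD lists (PySem.List.pyGetD idxs 0 0) []]) =
      (fun merged idxs => merged ++ [msG lists idxs]) from by
    funext merged idxs
    rw [msInner_id]
    exact ite_self _]
  rw [PySem.List.foldl_append_singleton_eq_map]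
  simp

-- the first index of a group is unchanged by appending another index
lemma msG_append (lists : List (List Int)) (v : List Int) (i : Int) (hv : v ≠ []) :
    msG lists (v ++ [i]) = msG lists v := by
  unfold msG
  congr 1
  cases v with
  | nil => exact absurd rfl hv
  | cons a t =>
    simp [PySem.List.pyGetD, PySem.List.pyGet?, PySem.List.pyIdx?,
      show (0:Int) ≤ (t.length:Int) + 1 from by positivity]

-- main invariant: processing the remaining enumerate pairs, A's dict view matches B's (seen, result) state
lemma msMain (lists : List (List Int)) :
    ∀ (pairs : List (Int × List Int)) (d : PySem.Dict (List Int) (List Int)),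
      d.keys.Nodup →
      (∀ p ∈ d.items, p.2 ≠ ([] : List Int)) →
      (∀ p ∈ pairs, PySem.List.pyGetD lists p.1 [] = p.2) →
      ((pairs.foldl (fun d p => d.modify (msKey p.2) [] (fun v => v ++ [p.1])) d).values).map (msG lists) =
        (pairs.foldl
          (fun st p =>
            if PySem.Set.contains st.1 (msKey p.2) then st
            else (PySem.Set.add st.1 (msKey p.2), st.2 ++ [p.2]))
          ((d.keys : PySem.Set (List Int)), (d.values).map (msG lists))).2 := by
  intro pairs
  induction pairs with
  | nil => intro d _ _ _; rfl
  | cons p pairs ih =>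
    intro d hnd hne hp
    simp only [List.foldl_cons]
    by_cases hc : d.contains (msKey p.2) = true
    · -- existing key: dict entry's value grows at the tail, B's state unchanged
      have hmem : msKey p.2 ∈ d.keys := (PySem.Dict.contains_iff_mem_keys d (msKey p.2)).mp hc
      have hcs : PySem.Set.contains (d.keys : PySem.Set (List Int)) (msKey p.2) = true := by
        simpa [PySem.Set.contains_iff] using hmem
      rw [hcs]
      simp only [if_true]
      set v := d.getD (msKey p.2) [] ++ [p.1] with hv
      have hmod : d.modify (msKey p.2) [] (fun v => v ++ [p.1]) = d.insert (msKey p.2) v := rfl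
      have hitems : (d.insert (msKey p.2) v).items
          = d.items.map (fun q => if q.1 == msKey p.2 then (msKey p.2, v) else q) :=
        PySem.Dict.items_insert_of_contains d v hc
      have hkeys : (d.insert (msKey p.2) v).keys = d.keys := by
        unfold PySem.Dict.keys
        rw [hitems, List.map_map]
        refine List.map_congr_left ?_
        intro q hq
        by_cases h1 : q.1 = msKey p.2
        · simp [Function.comp, h1]
        · simp [Function.comp, h1]
      have hvals : ((d.insert (msKey p.2) v).values).map (msG lists) = (d.values).map (msG lists) := by
        unfold PySem.Dict.values
        rw [hitems]
        simp only [List.map_map]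
        refine List.map_congr_left ?_
        intro q hq
        by_cases h1 : q.1 = msKey p.2
        · have hq2 : d.get? q.1 = some q.2 :=
            PySem.Dict.get?_of_mem_items d (by simpa using hq) hnd
          have hgd : d.getD (msKey p.2) [] = q.2 := by
            rw [← h1, PySem.Dict.getD_eq_get?_getD, hq2]; rfl
          simp only [Function.comp, h1, beq_self_eq_true, if_true]
          show msG lists v = msG lists q.2
          rw [hv, hgd]
          exact msG_append lists q.2 p.1 (hne q hq)
        · simp [Function.comp, h1]
      rw [hmod]
      rw [ih (d.insert (msKey p.2) v)
        (hkeys ▸ hnd)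
        (by intro q hq
            rw [hitems] at hq
            rcases List.mem_map.mp hq with ⟨r, hr, hrq⟩
            by_cases h1 : r.1 == msKey p.2
            · simp only [h1, if_true] at hrq
              rw [← hrq]
              simp [hv]
            · simp only [h1] at hrq
              exact hrq ▸ hne r hr)
        (fun q hq => hp q (List.mem_cons_of_mem p hq))]
      rw [hkeys, hvals]
    · -- new key: dict appends (key, [index]); B appends key to seen and the list to result
      have hmem : msKey p.2 ∉ d.keys := fun h =>
        hc ((PySem.Dict.contains_iff_mem_keys d (msKey p.2)).mpr h)
      have hcs : PySem.Set.contains (d.keys : PySem.Set (List Int)) (msKey p.2) = false := by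
        rw [← Bool.not_eq_true]
        intro h
        exact hmem ((PySem.Set.contains_iff d.keys (msKey p.2)).mp h)
      rw [hcs]
      simp only [Bool.false_eq_true, if_false]
      have hmod : d.modify (msKey p.2) [] (fun v => v ++ [p.1]) = d.insert (msKey p.2) [p.1] := by
        unfold PySem.Dict.modify
        rw [PySem.Dict.getD_of_not_contains d [] (by simpa using hc)]
        rfl
      have hitems : (d.insert (msKey p.2) [p.1]).items = d.items ++ [(msKey p.2, [p.1])] :=
        PySem.Dict.items_insert_of_not_contains d [p.1] (by simpa using hc)
      have hkeys : (d.insert (msKey p.2) [p.1]).keys = d.keys ++ [msKey p.2] := by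
        unfold PySem.Dict.keys; rw [hitems]; simp
      have hadd : PySem.Set.add (d.keys : PySem.Set (List Int)) (msKey p.2) = d.keys ++ [msKey p.2] :=
        PySem.Set.add_of_not_mem hmem
      have hvals : ((d.insert (msKey p.2) [p.1]).values).map (msG lists)
          = (d.values).map (msG lists) ++ [p.2] := by
        unfold PySem.Dict.values
        rw [hitems]
        simp only [List.map_append, List.map_map, List.map_cons, List.map_nil]
        congr 1
        show [msG lists [p.1]] = [p.2]
        congr 1
        unfold msG
        have h0 : PySem.List.pyGetD ([p.1] : List Int) 0 0 = p.1 := by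
          simp [PySem.List.pyGetD, PySem.List.pyGet?, PySem.List.pyIdx?]
        rw [h0]
        exact hp p (List.mem_cons_self)
      rw [hmod]
      rw [ih (d.insert (msKey p.2) [p.1])
        (by rw [hkeys]
            refine List.Nodup.append hnd (List.nodup_singleton _) ?_
            intro a ha hb
            exact hmem (List.mem_singleton.mp hb ▸ ha))
        (by intro q hq
            rw [hitems] at hq
            rcases List.mem_append.mp hq with h | h
            · exact hne q h
            · simp only [List.mem_singleton] at h
              rw [h]; simp)
        (fun q hq => hp q (List.mem_cons_of_mem p hq))]
      rw [hkeys, hadd, hvals]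

-- ===== VERDICT (by name: the statement is the Claim_ definition above) =====
theorem merge_same_list_spec : Claim_equal_merge_same_list := by
  intro lists _
  show merge_same_list lists = merge_same_list_alt lists
  rw [msA_eq_map]
  have hp : ∀ p ∈ PySem.List.enumerate lists 0, PySem.List.pyGetD lists p.1 [] = p.2 := by
    intro p hmem
    rcases (PySem.List.mem_enumerate_iff lists 0 p).mp hmem with ⟨k, hk, rfl⟩
    simp only [Int.zero_add]
    rw [PySem.List.pyGetD_natCast]
    simp [List.getD, hk]
  have h := msMain lists (PySem.List.enumerate lists 0) PySem.Dict.empty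
    (by simp [PySem.Dict.keys, PySem.Dict.empty]) (by simp [PySem.Dict.empty]) hp
  rw [h]
  unfold merge_same_list_alt
  conv_rhs => rw [← PySem.List.map_snd_enumerate lists 0, List.foldl_map]
  rfl
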